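-- pv_equiv track=rewrite | github.com/aig-upf/fslab | src/fslab/cached_revision.py | _get_options_relevant_for_cache_name
-- ===== SOURCE A (Python) =====
-- def _get_options_relevant_for_cache_name(options):
--     """
--     Remove "-j", "-j4" and "-j 4" options.
--
--     These options do not influence the result of the build and a build
--     shouldn't be done again just because we build with a different
--     number of jobs.
--
--     This behaviour is important on the grid, where the compute and the
--     job submission nodes have different numbers of cores. If we made
--     these options part of the directory name, lab would try to
--     recompile the planner on a compute node, which is undesirable.
--     """
--     relevant_options = options[:]
--     for index, option in enumerate(relevant_options):
--         if option and option.startswith('-j'):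
--             jobs = option[2:]
--             if not jobs or jobs.isdigit():
--                 relevant_options[index] = None
--             if not jobs and len(relevant_options) > index + 1:
--                 next_option = relevant_options[index + 1]
--                 if next_option.isdigit():
--                     relevant_options[index + 1] = None
--     return [x for x in relevant_options if x is not None]
-- ===== SOURCE B (Python) =====
-- def _get_options_relevant_for_cache_name(options):
--     """Remove "-j", "-j4" and "-j 4" options (single forward pass, no None marking)."""
--     result = []
--     i = 0
--     n = len(options)
--     while i < n:
--         option = options[i]
--         if option and option.startswith('-j'):
--             jobs = option[2:]
--             if not jobs or jobs.isdigit():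
--                 if not jobs and i + 1 < n and options[i + 1].isdigit():
--                     i += 2  # bare -j: also drop the following job count
--                 else:
--                     i += 1
--                 continue
--         result.append(option)
--         i += 1
--     return result
-- ===== Notes on version B (the rewrite author's own statement) =====
-- stated objective: simpler
-- what changed: A copies the list, overwrites dropped entries with None (including look-ahead mutation of the next entry) and then filters the Nones out in a second pass; B is a single forward pass over the input that appends kept options directly, consuming the following job-count element inline after a bare -j.
import Mathlib
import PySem

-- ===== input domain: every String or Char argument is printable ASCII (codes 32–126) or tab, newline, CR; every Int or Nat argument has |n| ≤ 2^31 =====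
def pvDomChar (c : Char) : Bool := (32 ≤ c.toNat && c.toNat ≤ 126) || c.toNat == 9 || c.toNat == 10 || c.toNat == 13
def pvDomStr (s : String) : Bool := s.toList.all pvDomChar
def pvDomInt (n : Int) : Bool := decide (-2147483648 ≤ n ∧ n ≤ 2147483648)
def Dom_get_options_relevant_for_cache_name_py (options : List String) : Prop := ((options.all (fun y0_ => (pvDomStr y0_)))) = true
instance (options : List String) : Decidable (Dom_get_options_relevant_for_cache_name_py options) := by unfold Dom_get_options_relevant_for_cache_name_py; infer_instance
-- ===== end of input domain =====

-- B replaces A's copy + None-marking + filter two-pass scheme with a single forward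
-- pass that appends kept options directly (objective: simpler, one pass, no marker list).

-- ===== PORT A =====
-- A marks dropped entries with None inside a copy of the list; the mutable list of
-- "str or None" is modelled as List (Option String). One iteration of A's for-loop
-- (reading the CURRENT, possibly already-marked list, as Python's enumerate does):
def pyAstep (rel : List (Option String)) (index : Nat) : List (Option String) :=
  match rel[index]? with
  | some (some option) =>
    if option ≠ "" ∧ PySem.Str.startswith option "-j" then
      let jobs := PySem.Str.slice option (some 2) none
      let rel :=
        if jobs = "" ∨ PySem.Str.strIsdigit jobs then rel.set index none else rel
      if jobs = "" ∧ rel.length > index + 1 then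
        match rel[index + 1]? with
        | some (some next_option) =>
          if PySem.Str.strIsdigit next_option then rel.set (index + 1) none else rel
        | _ => rel  -- next is None: unreachable when every element starts as a string
      else rel
    else rel
  | _ => rel  -- current element already marked None: Python's `if option` is falsy

def get_options_relevant_for_cache_name_py (options : List String) : List String :=
  let relevant_options : List (Option String) := options.map some  -- options[:]
  let relevant_options :=
    (List.range relevant_options.length).foldl pyAstep relevant_options
  relevant_options.filterMap id  -- [x for x in relevant_options if x is not None]

-- ===== PORT B =====
-- B's while-loop over index i, ported as recursion on the suffix options[i:];
-- `i += 2` (the continue after a bare -j plus digit) consumes two elements.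
def altGo : List String → List String
  | [] => []
  | option :: rest =>
    if option ≠ "" ∧ PySem.Str.startswith option "-j" then
      let jobs := PySem.Str.slice option (some 2) none
      if jobs = "" ∨ PySem.Str.strIsdigit jobs then
        if jobs = "" ∧ rest.head?.any (fun next => PySem.Str.strIsdigit next) then
          altGo rest.tail  -- i += 2
        else altGo rest    -- i += 1
      else option :: altGo rest
    else option :: altGo rest
  termination_by l => l.length
  decreasing_by
  · simp [List.length_tail]
  · simp
  · simp
  · simp

def get_options_relevant_for_cache_name_py_alt (options : List String) : List String :=
  altGo options

-- ===== PRECONDITION & SPEC =====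
def Spec_get_options_relevant_for_cache_name_py (options : List String) (out : List String) : Prop := out = get_options_relevant_for_cache_name_py_alt options
instance (options : List String) (out : List String) : Decidable (Spec_get_options_relevant_for_cache_name_py options out) := by unfold Spec_get_options_relevant_for_cache_name_py; infer_instance

-- ===== CLAIM (what is proved, stated in full; the proofs are below) =====
def Claim_equal_get_options_relevant_for_cache_name_py : Prop := ∀ (options : List String), Dom_get_options_relevant_for_cache_name_py options → Spec_get_options_relevant_for_cache_name_py options (get_options_relevant_for_cache_name_py options)

-- ===== LEMMAS AND PROOFS =====

-- Unfolding lemmas for altGo, one per branch of B's loop body.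
theorem altGo_keep_other (o : String) (r : List String)
    (hc : ¬(o ≠ "" ∧ PySem.Str.startswith o "-j" = true)) :
    altGo (o :: r) = o :: altGo r := by
  rw [altGo.eq_def]; dsimp only; rw [if_neg hc]

theorem altGo_keep_nondigit (o : String) (r : List String)
    (hc : o ≠ "" ∧ PySem.Str.startswith o "-j" = true)
    (hd : ¬(PySem.Str.slice o (some 2) none = "" ∨
        PySem.Str.strIsdigit (PySem.Str.slice o (some 2) none) = true)) :
    altGo (o :: r) = o :: altGo r := by
  rw [altGo.eq_def]; dsimp only; rw [if_pos hc, if_neg hd]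

theorem altGo_drop_jN (o : String) (r : List String)
    (hc : o ≠ "" ∧ PySem.Str.startswith o "-j" = true)
    (hj : ¬PySem.Str.slice o (some 2) none = "")
    (hd : PySem.Str.strIsdigit (PySem.Str.slice o (some 2) none) = true) :
    altGo (o :: r) = altGo r := by
  rw [altGo.eq_def]; dsimp only
  rw [if_pos hc, if_pos (Or.inr hd), if_neg (by simp [hj])]

theorem altGo_drop_bare_last (o : String)
    (hc : o ≠ "" ∧ PySem.Str.startswith o "-j" = true)
    (hj : PySem.Str.slice o (some 2) none = "") :
    altGo [o] = [] := by
  rw [altGo.eq_def]; dsimp only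
  rw [if_pos hc, if_pos (Or.inl hj), if_neg (by simp)]
  rw [altGo.eq_def]

theorem altGo_drop_bare_digit (o next : String) (r : List String)
    (hc : o ≠ "" ∧ PySem.Str.startswith o "-j" = true)
    (hj : PySem.Str.slice o (some 2) none = "")
    (hd : PySem.Str.strIsdigit next = true) :
    altGo (o :: next :: r) = altGo r := by
  rw [altGo.eq_def]; dsimp only
  rw [if_pos hc, if_pos (Or.inl hj), if_pos ⟨hj, by simpa using hd⟩]
  rfl

theorem altGo_drop_bare_nondigit (o next : String) (r : List String)
    (hc : o ≠ "" ∧ PySem.Str.startswith o "-j" = true)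
    (hj : PySem.Str.slice o (some 2) none = "")
    (hd : ¬PySem.Str.strIsdigit next = true) :
    altGo (o :: next :: r) = altGo (next :: r) := by
  rw [altGo.eq_def]; dsimp only
  rw [if_pos hc, if_pos (Or.inl hj),
      if_neg (by rintro ⟨-, h2⟩; exact hd (by simpa using h2))]

-- Invariant of A's loop: running the remaining indices on a state
-- `done ++ rest.map some` (done = processed prefix with its None marks,
-- rest = untouched tail) filters to `done.filterMap id ++ altGo rest`.
theorem pyA_loop_eq_altGo (n : Nat) :
    ∀ (rest : List String), rest.length ≤ n → ∀ (done : List (Option String)),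
      ((List.range' done.length rest.length).foldl pyAstep
        (done ++ rest.map some)).filterMap id
      = done.filterMap id ++ altGo rest := by
  induction n with
  | zero =>
    intro rest h done
    have : rest = [] := List.eq_nil_of_length_eq_zero (Nat.le_zero.mp h)
    subst this
    simp [altGo.eq_def]
  | succ n ih =>
    intro rest h done
    match rest with
    | [] => simp [altGo.eq_def]
    | option :: rest' =>
      have hlen : rest'.length ≤ n := by simp at h; omega
      simp only [List.map_cons, List.length_cons, List.range'_succ, List.foldl_cons]
      have hget : (done ++ some option :: List.map some rest')[done.length]?
          = some (some option) := by
        rw [List.getElem?_append_right (le_refl _)]; simp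
      by_cases hc : option ≠ "" ∧ PySem.Str.startswith option "-j" = true
      · by_cases hd : PySem.Str.slice option (some 2) none = "" ∨
            PySem.Str.strIsdigit (PySem.Str.slice option (some 2) none) = true
        · by_cases hj : PySem.Str.slice option (some 2) none = ""
          · -- bare "-j": the entry and possibly the next one are marked None
            match rest' with
            | [] =>
              have hset : (done ++ some option :: List.map some ([] : List String)).set
                  done.length none = done ++ [none] := by simp
              have hstep : pyAstep (done ++ some option :: List.map some ([] : List String))
                  done.length = done ++ [none] := by
                simp only [pyAstep, hget]
                rw [if_pos hc, if_pos (Or.inl hj), hset,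
                    if_neg (by rintro ⟨-, h2⟩; simp at h2)]
              rw [hstep]
              rw [altGo_drop_bare_last option hc hj]
              simp [List.filterMap_append]
            | next :: rest'' =>
              simp only [List.map_cons]
              have hget' : (done ++ some option :: some next :: List.map some rest'')[done.length]?
                  = some (some option) := by
                rw [List.getElem?_append_right (le_refl _)]; simp
              have hset1 : (done ++ some option :: some next :: List.map some rest'').set
                  done.length none = done ++ none :: some next :: List.map some rest'' := by
                simp
              have hC2 : PySem.Str.slice option (some 2) none = "" ∧
                  (done ++ none :: some next :: List.map some rest'').length > done.length + 1 := by
                refine ⟨hj, ?_⟩; simp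
              have hget2 : (done ++ none :: some next :: List.map some rest'')[done.length + 1]?
                  = some (some next) := by
                rw [List.getElem?_append_right (by omega)]
                simp
              by_cases hdig : PySem.Str.strIsdigit next = true
              · -- "-j" followed by a digit string: both become None
                have hset2 : (done ++ none :: some next :: List.map some rest'').set
                    (done.length + 1) none = done ++ none :: none :: List.map some rest'' := by
                  simp
                have hstep : pyAstep (done ++ some option :: some next :: List.map some rest'')
                    done.length = done ++ none :: none :: List.map some rest'' := by
                  simp only [pyAstep, hget']
                  rw [if_pos hc, if_pos (Or.inl hj), hset1, if_pos hC2]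
                  simp only [hget2]
                  rw [if_pos hdig, hset2]
                rw [hstep]
                -- the next iteration sees the freshly written None and does nothing
                have hid : pyAstep (done ++ none :: none :: List.map some rest'')
                    (done.length + 1) = done ++ none :: none :: List.map some rest'' := by
                  have hg : (done ++ none :: none :: List.map some rest'')[done.length + 1]?
                      = some none := by
                    rw [List.getElem?_append_right (by omega)]
                    simp
                  simp only [pyAstep, hg]
                simp only [List.length_cons, List.range'_succ, List.foldl_cons]
                rw [hid]
                have hlen'' : rest''.length ≤ n := by simp at h; omega
                have hthis := ih rest'' hlen'' (done ++ [none, none])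
                rw [show ((done ++ [(none : Option String), none]) ++ List.map some rest'')
                    = done ++ none :: none :: List.map some rest'' by simp] at hthis
                rw [show (done ++ [(none : Option String), none]).length = done.length + 2 by simp] at hthis
                rw [show done.length + 1 + 1 = done.length + 2 from rfl]
                rw [hthis]
                rw [altGo_drop_bare_digit option next rest'' hc hj hdig]
                simp [List.filterMap_append]
              · -- "-j" followed by a non-digit: only the "-j" becomes None
                have hstep : pyAstep (done ++ some option :: some next :: List.map some rest'')
                    done.length = done ++ none :: some next :: List.map some rest'' := by
                  simp only [pyAstep, hget']
                  rw [if_pos hc, if_pos (Or.inl hj), hset1, if_pos hC2]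
                  simp only [hget2]
                  rw [if_neg hdig]
                rw [hstep]
                have hthis := ih (next :: rest'') hlen (done ++ [none])
                rw [show ((done ++ [(none : Option String)]) ++ List.map some (next :: rest''))
                    = done ++ none :: some next :: List.map some rest'' by simp] at hthis
                rw [show (done ++ [(none : Option String)]).length = done.length + 1 by simp] at hthis
                rw [hthis]
                rw [altGo_drop_bare_nondigit option next rest'' hc hj hdig]
                simp [List.filterMap_append]
          · -- "-jN" with N all digits: the entry alone is marked None
            have hdig' : PySem.Str.strIsdigit (PySem.Str.slice option (some 2) none) = true := by
              rcases hd with h' | h'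
              · exact absurd h' hj
              · exact h'
            have hset : (done ++ some option :: List.map some rest').set done.length none
                = done ++ none :: List.map some rest' := by simp
            have hstep : pyAstep (done ++ some option :: List.map some rest') done.length
                = done ++ none :: List.map some rest' := by
              simp only [pyAstep, hget]
              rw [if_pos hc, if_pos hd, hset, if_neg (by rintro ⟨h1, -⟩; exact hj h1)]
            rw [hstep]
            have hthis := ih rest' hlen (done ++ [none])
            rw [show ((done ++ [(none : Option String)]) ++ List.map some rest')
                = done ++ none :: List.map some rest' by simp] at hthis
            rw [show (done ++ [(none : Option String)]).length = done.length + 1 by simp] at hthis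
            rw [hthis]
            rw [altGo_drop_jN option rest' hc hj hdig']
            simp [List.filterMap_append]
        · -- "-j…" but neither bare nor a digit count: kept, state unchanged
          have hstep : pyAstep (done ++ some option :: List.map some rest') done.length
              = done ++ some option :: List.map some rest' := by
            simp only [pyAstep, hget]
            rw [if_pos hc, if_neg hd, if_neg (by rintro ⟨h1, -⟩; exact hd (Or.inl h1))]
          rw [hstep]
          have hthis := ih rest' hlen (done ++ [some option])
          rw [show ((done ++ [some option]) ++ List.map some rest')
              = done ++ some option :: List.map some rest' by simp] at hthis
          rw [show (done ++ [some option]).length = done.length + 1 by simp] at hthis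
          rw [hthis]
          rw [altGo_keep_nondigit option rest' hc hd]
          simp [List.filterMap_append]
      · -- not a "-j" option (or empty string): kept, state unchanged
        have hstep : pyAstep (done ++ some option :: List.map some rest') done.length
            = done ++ some option :: List.map some rest' := by
          simp only [pyAstep, hget]
          rw [if_neg hc]
        rw [hstep]
        have hthis := ih rest' hlen (done ++ [some option])
        rw [show ((done ++ [some option]) ++ List.map some rest')
            = done ++ some option :: List.map some rest' by simp] at hthis
        rw [show (done ++ [some option]).length = done.length + 1 by simp] at hthis
        rw [hthis]
        rw [altGo_keep_other option rest' hc]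
        simp [List.filterMap_append]

-- ===== VERDICT (by name: the statement is the Claim_ definition above) =====
theorem get_options_relevant_for_cache_name_py_spec : Claim_equal_get_options_relevant_for_cache_name_py := by
  intro options _
  unfold Spec_get_options_relevant_for_cache_name_py
  unfold get_options_relevant_for_cache_name_py get_options_relevant_for_cache_name_py_alt
  have hmain := pyA_loop_eq_altGo options.length options (le_refl _) []
  simpa [List.range_eq_range', List.length_map] using hmain
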